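-- pv_equiv track=rewrite | github.com/vlad-marlo/algorithms | school/ege/kompege/27/7097.py | solution
-- ===== SOURCE A (Python) =====
-- def solution(data: list[int]) -> int:
--     data = list(map(lambda x: x // 44 + int(x % 44 > 0), data))
--     sm = sum(data)
--     c = 0
--     for i in range(len(data)):
--         c += i * data[i]
--     b = data[0]
--     ans = 10000000000000**1000
--     for i in range(1, len(data)):
--         c += 2 * b - sm
--         if data[i]:
--             ans = min(c, ans)
--         b += data[i]
--     return ans
-- ===== SOURCE B (Python) =====
-- def solution(data: list[int]) -> int:
--     d = [x // 44 + (1 if x % 44 > 0 else 0) for x in data]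
--     n = len(d)
--     P = []  # P[k] = d[0] + ... + d[k]
--     W = []  # W[k] = 0*d[0] + ... + k*d[k]
--     p = 0
--     w = 0
--     for j, x in enumerate(d):
--         p += x
--         w += j * x
--         P.append(p)
--         W.append(w)
--     best = 10000000000000 ** 1000
--     for i in range(1, n):
--         if d[i]:
--             cost = i * P[i - 1] - W[i - 1] + (w - W[i]) - i * (p - P[i])
--             best = min(cost, best)
--     return best
-- ===== Notes on version B (the rewrite author's own statement) =====
-- stated objective: alternative
-- what changed: B replaces A's incremental running-cost update (c += 2*b - sm carried across one fused loop) by two passes: it first builds prefix-sum tables P and W, then computes each candidate position's total weighted cost independently from the tables (i*P[i-1]-W[i-1] plus the right-side term) and takes the minimum.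
import Mathlib
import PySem

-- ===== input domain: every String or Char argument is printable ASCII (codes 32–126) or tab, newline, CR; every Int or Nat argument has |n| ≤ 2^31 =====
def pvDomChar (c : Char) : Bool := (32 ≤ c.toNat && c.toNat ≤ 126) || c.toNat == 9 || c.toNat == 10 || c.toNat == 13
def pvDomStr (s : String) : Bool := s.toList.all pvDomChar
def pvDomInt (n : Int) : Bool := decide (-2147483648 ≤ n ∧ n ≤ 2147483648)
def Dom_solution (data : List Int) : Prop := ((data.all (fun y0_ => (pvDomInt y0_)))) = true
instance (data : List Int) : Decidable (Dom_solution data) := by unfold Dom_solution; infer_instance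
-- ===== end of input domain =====

-- B replaces A's fused incremental running-cost loop by two passes: build prefix-sum
-- tables, then compute each candidate cost independently from them (alternative, not faster).

-- ===== PORT A =====
def pvCeil44 (x : Int) : Int :=
  PySem.Int.floordiv x 44 + (if PySem.Int.mod x 44 > 0 then 1 else 0)

-- the `for i in range(1, len(data))` loop of A, over the suffix data[i:], state (c, b, ans)
def solLoopA (sm : Int) : List Int → Int → Int → Int → Int
  | [], _, _, ans => ans
  | x :: rest, c, b, ans =>
    let c' := c + 2 * b - sm
    solLoopA sm rest c' (b + x) (if x ≠ 0 then min c' ans else ans)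

def solution (data : List Int) : Int :=
  let d := data.map pvCeil44
  let sm := d.sum
  let c := (PySem.List.enumerate d 0).foldl (fun c p => c + p.1 * p.2) 0
  match d with
  | [] => 0   -- Python raises IndexError reading the first element; excluded by Pre_solution
  | b0 :: rest => solLoopA sm rest c b0 (10000000000000 ^ 1000)

-- ===== PORT B =====
-- first pass of Source B: running totals p, w and the appended prefix tables P, W
def buildStep (st : Int × Int × List Int × List Int) (jx : Int × Int) : Int × Int × List Int × List Int :=
  (st.1 + jx.2, st.2.1 + jx.1 * jx.2, st.2.2.1 ++ [st.1 + jx.2], st.2.2.2 ++ [st.2.1 + jx.1 * jx.2])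

def solution_alt (data : List Int) : Int :=
  let d := data.map pvCeil44
  let st := (PySem.List.enumerate d 0).foldl buildStep (0, 0, [], [])
  (PySem.List.pyRange 1 (d.length : Int) 1).foldl
    (fun best i =>
      if PySem.List.pyGetD d i 0 ≠ 0 then
        min (i * PySem.List.pyGetD st.2.2.1 (i - 1) 0 - PySem.List.pyGetD st.2.2.2 (i - 1) 0
              + (st.2.1 - PySem.List.pyGetD st.2.2.2 i 0)
              - i * (st.1 - PySem.List.pyGetD st.2.2.1 i 0)) best
      else best)
    (10000000000000 ^ 1000)

-- ===== PRECONDITION & SPEC =====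
-- Pre_ excludes only the empty list, on which A raises IndexError reading the first element.
def Pre_solution (data : List Int) : Prop := data ≠ []
instance (data : List Int) : Decidable (Pre_solution data) := by unfold Pre_solution; infer_instance
def pvWitness_solution : List Int := ([44, 100, 0])

def Spec_solution (data : List Int) (out : Int) : Prop := out = solution_alt data
instance (data : List Int) (out : Int) : Decidable (Spec_solution data out) := by unfold Spec_solution; infer_instance

-- ===== CLAIM (what is proved, stated in full; the proofs are below) =====
def Claim_equal_solution : Prop := ∀ (data : List Int), Dom_solution data → Pre_solution data → Spec_solution data (solution data)

-- ===== LEMMAS AND PROOFS =====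

-- the cost B computes at position i
def pvCost (d : List Int) (i : Int) : Int :=
  ((PySem.List.enumerate d 0).map (fun p => |p.1 - i| * p.2)).sum

-- region j ≥ i: moving the pivot from i-1 to i lowers every term by its weight
lemma sum_abs_ge (d : List Int) : ∀ (s i : Int), i ≤ s →
    ((PySem.List.enumerate d s).map (fun p => |p.1 - i| * p.2)).sum
      = ((PySem.List.enumerate d s).map (fun p => |p.1 - (i - 1)| * p.2)).sum - d.sum := by
  induction d with
  | nil => intro s i _; simp [PySem.List.enumerate_nil]
  | cons x r ih =>
    intro s i h
    rw [PySem.List.enumerate_cons]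
    simp only [List.map_cons, List.sum_cons, List.sum_cons]
    rw [ih (s + 1) i (by omega)]
    rw [abs_of_nonneg (by omega : (0:Int) ≤ s - i), abs_of_nonneg (by omega : (0:Int) ≤ s - (i - 1))]
    ring

-- the incremental step: cost(i) = cost(i-1) + 2 * prefix(i) - total
lemma cost_step (d : List Int) : ∀ (s i : Int), s ≤ i →
    ((PySem.List.enumerate d s).map (fun p => |p.1 - i| * p.2)).sum
      = ((PySem.List.enumerate d s).map (fun p => |p.1 - (i - 1)| * p.2)).sum
        + 2 * (d.take (i - s).toNat).sum - d.sum := by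
  induction d with
  | nil => intro s i _; simp [PySem.List.enumerate_nil]
  | cons x r ih =>
    intro s i h
    rcases eq_or_lt_of_le h with rfl | hlt
    · have := sum_abs_ge (x :: r) s s (le_refl s)
      rw [this]
      simp
    · rw [PySem.List.enumerate_cons]
      simp only [List.map_cons, List.sum_cons]
      have htn : (i - s).toNat = (i - (s + 1)).toNat + 1 := by omega
      rw [htn, List.take_succ_cons, List.sum_cons]
      rw [ih (s + 1) i (by omega)]
      rw [abs_of_nonpos (by omega : s - i ≤ 0), abs_of_nonpos (by omega : s - (i - 1) ≤ 0)]
      ring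

lemma foldl_add_map (l : List (Int × Int)) : ∀ a : Int,
    l.foldl (fun c p => c + p.1 * p.2) a = a + (l.map (fun p => p.1 * p.2)).sum := by
  induction l with
  | nil => intro a; simp
  | cons x r ih => intro a; simp [ih]; ring

lemma cost_zero (d : List Int) :
    pvCost d 0 = ((PySem.List.enumerate d 0).map (fun p => p.1 * p.2)).sum := by
  unfold pvCost
  refine congrArg List.sum (List.map_congr_left fun p hp => ?_)
  obtain ⟨k, hk, rfl⟩ := (PySem.List.mem_enumerate_iff _ _ _).1 hp
  simp

-- the main loop invariant: A's incremental state at position i is B's direct cost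
lemma loop_eq (d : List Int) (m : Nat) : ∀ (i : Nat), i + m = d.length → 1 ≤ i → ∀ ans : Int,
    solLoopA d.sum (d.drop i) (pvCost d ((i : Int) - 1)) ((d.take i).sum) ans
      = (PySem.List.pyRange (i : Int) (d.length : Int) 1).foldl
          (fun best j => if PySem.List.pyGetD d j 0 ≠ 0 then min (pvCost d j) best else best) ans := by
  induction m with
  | zero =>
    intro i hlen _ ans
    have hi : i = d.length := by omega
    subst hi
    rw [List.drop_length, PySem.List.pyRange_one_eq_nil (le_refl _)]
    rfl
  | succ m ih =>
    intro i hlen hi ans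
    have hilt : i < d.length := by omega
    rw [List.drop_eq_getElem_cons hilt]
    rw [PySem.List.pyRange_one_cons (by exact_mod_cast hilt)]
    simp only [List.foldl_cons, solLoopA]
    have hget : PySem.List.pyGetD d (i : Int) 0 = d[i] := by
      rw [PySem.List.pyGetD_natCast, List.getD_eq_getElem d 0 hilt]
    have hcost : pvCost d ((i : Int) - 1) + 2 * (d.take i).sum - d.sum = pvCost d (i : Int) := by
      have h := cost_step d 0 (i : Int) (Int.natCast_nonneg i)
      unfold pvCost
      rw [h]
      simp
    rw [hget, hcost]
    have hstep := ih (i + 1) (by omega) (by omega) (if d[i] ≠ 0 then min (pvCost d (i : Int)) ans else ans)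
    simp only [Nat.cast_add, Nat.cast_one, show ((i : Int) + 1 - 1) = (i : Int) from by ring,
      List.sum_take_succ d i hilt] at hstep
    exact hstep

-- prefix sums as functions (proof-side only)
def Sp (d : List Int) (k : Nat) : Int := (d.take k).sum
def Tp (d : List Int) (k : Nat) : Int :=
  (((PySem.List.enumerate d 0).take k).map (fun q => q.1 * q.2)).sum

lemma Tp_succ (d : List Int) (k : Nat) (h : k < d.length) :
    Tp d (k + 1) = Tp d k + (k : Int) * d[k] := by
  unfold Tp
  rw [List.take_add_one, PySem.List.getElem?_enumerate]
  simp [List.getElem?_eq_getElem h]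

-- what the first pass of B builds: totals and the two prefix tables
lemma build_inv (d : List Int) : ∀ (s p w : Int) (P W : List Int),
    (PySem.List.enumerate d s).foldl buildStep (p, w, P, W)
      = (p + d.sum,
         w + ((PySem.List.enumerate d s).map (fun q => q.1 * q.2)).sum,
         P ++ (List.range d.length).map (fun k => p + (d.take (k + 1)).sum),
         W ++ (List.range d.length).map
           (fun k => w + (((PySem.List.enumerate d s).take (k + 1)).map (fun q => q.1 * q.2)).sum)) := by
  induction d with
  | nil => intro s p w P W; simp [PySem.List.enumerate_nil]
  | cons x r ih =>
    intro s p w P W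
    rw [PySem.List.enumerate_cons]
    simp only [List.foldl_cons, buildStep]
    rw [ih]
    refine Prod.ext (by simp [add_assoc]) (Prod.ext (by simp [add_assoc]) (Prod.ext ?_ ?_)) <;>
      simp [List.range_succ_eq_map, List.map_map, Function.comp_def, List.take_succ_cons,
        List.append_assoc, add_assoc]

-- the closed-form cost from the tables equals the direct cost
lemma table_eq (d : List Int) : ∀ (i : Nat), i < d.length →
    (i : Int) * Sp d i - Tp d i
        + (((PySem.List.enumerate d 0).map (fun q => q.1 * q.2)).sum - Tp d (i + 1))
        - (i : Int) * (d.sum - Sp d (i + 1)) = pvCost d (i : Int) := by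
  intro i
  induction i with
  | zero =>
    intro h
    rw [show ((0 : Nat) : Int) = 0 by norm_num, cost_zero, Tp_succ d 0 h]
    simp [Sp, Tp]
  | succ i ih =>
    intro h
    have hi : i < d.length := by omega
    have hrec := cost_step d 0 ((i : Int) + 1) (by omega)
    have h1 : ((i : Int) + 1 - 1) = (i : Int) := by ring
    have h2 : (((i : Int) + 1 - 0)).toNat = i + 1 := by omega
    rw [h1, h2] at hrec
    have hcost : pvCost d ((i : Int) + 1) = pvCost d (i : Int) + 2 * Sp d (i + 1) - d.sum := by
      unfold pvCost Sp; rw [hrec]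
    have hS1 : Sp d (i + 1) = Sp d i + d[i] := by
      unfold Sp; exact List.sum_take_succ d i hi
    have hS2 : Sp d (i + 2) = Sp d (i + 1) + d[i + 1] := by
      unfold Sp; exact List.sum_take_succ d (i + 1) h
    have hT1 : Tp d (i + 1) = Tp d i + (i : Int) * d[i] := Tp_succ d i hi
    have hT2 : Tp d (i + 2) = Tp d (i + 1) + ((i + 1 : Nat) : Int) * d[i + 1] := Tp_succ d (i + 1) h
    have := ih hi
    push_cast at hT2 ⊢
    rw [show ((i : Nat) + 1 : Nat) = i + 1 from rfl] at hcost
    rw [hcost, ← this, hS2, hT2, hS1, hT1]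
    ring

-- ===== VERDICT (by name: the statement is the Claim_ definition above) =====
theorem solution_spec : Claim_equal_solution := by
  intro data _ hpre
  unfold Spec_solution
  have hd : data.map pvCeil44 ≠ [] := by
    intro h; exact hpre (List.map_eq_nil_iff.1 h)
  obtain ⟨b0, rest, hcase⟩ : ∃ b0 rest, data.map pvCeil44 = b0 :: rest := by
    cases h : data.map pvCeil44 with
    | nil => exact absurd h hd
    | cons a l => exact ⟨a, l, rfl⟩
  simp only [solution, solution_alt, hcase]
  have hc0 : (PySem.List.enumerate (b0 :: rest) 0).foldl (fun c p => c + p.1 * p.2) 0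
      = pvCost (b0 :: rest) 0 := by
    rw [foldl_add_map, cost_zero]; ring
  have key := loop_eq (b0 :: rest) rest.length 1 (by simp [Nat.add_comm]) (le_refl 1) (10000000000000 ^ 1000)
  have h0 : ((1 : Nat) : Int) - 1 = 0 := by norm_num
  rw [h0] at key
  simp only [List.drop_succ_cons, List.drop_zero, List.take_succ_cons, List.take_zero,
    List.sum_cons, List.sum_nil, add_zero, Nat.cast_one] at key
  simp only [List.sum_cons]
  rw [hc0, key]
  -- both sides are now folds over pyRange 1 n; identify the bodies on members
  rw [build_inv (b0 :: rest) 0 0 0 [] []]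
  refine (PySem.List.foldl_congr_mem _ _ _ _ ?_).symm
  intro best j hj
  obtain ⟨hj1, hj2⟩ := (PySem.List.mem_pyRange_one).1 hj
  set d := b0 :: rest with hdd
  obtain ⟨i, rfl⟩ : ∃ i : Nat, (i : Int) = j := ⟨j.toNat, Int.toNat_of_nonneg (by omega)⟩
  have hilt : i < d.length := by exact_mod_cast hj2
  have hi1 : 1 ≤ i := by exact_mod_cast hj1
  have hgd : PySem.List.pyGetD d (i : Int) 0 = d[i] := by
    rw [PySem.List.pyGetD_natCast, List.getD_eq_getElem d 0 hilt]
  have hm1 : ((i : Int) - 1) = ((i - 1 : Nat) : Int) := by omega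
  have hgP : ∀ k : Nat, k < d.length →
      PySem.List.pyGetD ((List.range d.length).map (fun k => (d.take (k + 1)).sum)) (k : Int) 0
        = Sp d (k + 1) := by
    intro k hk
    rw [PySem.List.pyGetD_natCast, List.getD_eq_getElem _ 0 (by simpa using hk)]
    simp [Sp, hk]
  have hgW : ∀ k : Nat, k < d.length →
      PySem.List.pyGetD ((List.range d.length).map
          (fun k => (((PySem.List.enumerate d 0).take (k + 1)).map (fun q => q.1 * q.2)).sum)) (k : Int) 0
        = Tp d (k + 1) := by
    intro k hk
    rw [PySem.List.pyGetD_natCast, List.getD_eq_getElem _ 0 (by simpa using hk)]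
    simp [Tp, hk]
  have hsub1 : i - 1 + 1 = i := by omega
  simp only [List.nil_append, zero_add]
  simp only [hgd, hm1, hgP (i - 1) (by omega), hgP i hilt, hgW (i - 1) (by omega), hgW i hilt, hsub1]
  rw [table_eq d i hilt]
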